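-- pv_equiv track=rewrite | github.com/HOPExxp/QZ | dayajichu/2019-6-24 。。。.py | create_player
-- ===== SOURCE A (Python) =====
-- def create_player(number,teamname):
--     后卫_list = []
--     得分后卫_list = []
--     小前锋_list = []
--     大前锋_list = []
--     中锋_list = []
--     for i in range(int(number)):
--         if (i + 1 ) % 5 == 1:
--             后卫_list.append(i + 1)
--         elif (i + 1 ) % 5 == 2:
--             得分后卫_list.append(i + 1)
--         elif (i + 1) % 5 == 3:
--             小前锋_list.append(i + 1)
--         elif (i + 1) % 5 == 4:
--             大前锋_list.append(i + 1)
--         elif (i + 1) % 5 == 0: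
--             中锋_list.append(i + 1)
--         else:
--             pass
--     # list1 = list[后卫_list,得分后卫_list,小前锋_list,大前锋_list,中锋_list]
--     # return list1
--     return 后卫_list,得分后卫_list,小前锋_list,大前锋_list,中锋_list,teamname
-- ===== SOURCE B (Python) =====
-- def create_player(number, teamname):
--     n = int(number)
--     return (list(range(1, n + 1, 5)),
--             list(range(2, n + 1, 5)),
--             list(range(3, n + 1, 5)),
--             list(range(4, n + 1, 5)),
--             list(range(5, n + 1, 5)),
--             teamname)
-- ===== Notes on version B (the rewrite author's own statement) =====
-- stated objective: idiomatic
-- what changed: Replaces the single scan over range(n) with mod-5 branching and five append accumulators by five closed-form arithmetic progressions range(r, n+1, 5), one per bucket.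
import Mathlib
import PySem

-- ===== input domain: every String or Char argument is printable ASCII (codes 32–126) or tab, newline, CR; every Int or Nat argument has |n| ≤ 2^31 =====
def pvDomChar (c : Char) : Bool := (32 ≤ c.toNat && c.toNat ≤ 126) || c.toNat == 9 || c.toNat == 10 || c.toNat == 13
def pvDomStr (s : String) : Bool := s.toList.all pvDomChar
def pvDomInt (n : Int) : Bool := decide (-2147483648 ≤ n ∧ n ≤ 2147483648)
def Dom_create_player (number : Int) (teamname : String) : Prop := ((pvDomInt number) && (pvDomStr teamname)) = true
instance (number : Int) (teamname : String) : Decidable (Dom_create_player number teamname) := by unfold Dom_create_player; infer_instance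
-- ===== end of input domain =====

-- B replaces A's mod-5 branching scan with five closed-form arithmetic progressions (idiomatic).


-- ===== PORT A =====
-- loop body of A: mod-5 branching over the running bucket state
def pvStepA (st : List Int × List Int × List Int × List Int × List Int) (i : Int) :
    List Int × List Int × List Int × List Int × List Int :=
  if PySem.Int.mod (i + 1) 5 = 1 then (st.1 ++ [i + 1], st.2.1, st.2.2.1, st.2.2.2.1, st.2.2.2.2)
  else if PySem.Int.mod (i + 1) 5 = 2 then (st.1, st.2.1 ++ [i + 1], st.2.2.1, st.2.2.2.1, st.2.2.2.2)
  else if PySem.Int.mod (i + 1) 5 = 3 then (st.1, st.2.1, st.2.2.1 ++ [i + 1], st.2.2.2.1, st.2.2.2.2)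
  else if PySem.Int.mod (i + 1) 5 = 4 then (st.1, st.2.1, st.2.2.1, st.2.2.2.1 ++ [i + 1], st.2.2.2.2)
  else if PySem.Int.mod (i + 1) 5 = 0 then (st.1, st.2.1, st.2.2.1, st.2.2.2.1, st.2.2.2.2 ++ [i + 1])
  else st

def create_player (number : Int) (teamname : String) :
    List Int × List Int × List Int × List Int × List Int × String :=
  -- int(number) on an int is the identity
  let st := (PySem.List.pyRange 0 number 1).foldl pvStepA ([], [], [], [], [])
  (st.1, st.2.1, st.2.2.1, st.2.2.2.1, st.2.2.2.2, teamname)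

-- ===== PORT B =====
def create_player_alt (number : Int) (teamname : String) :
    List Int × List Int × List Int × List Int × List Int × String :=
  let n := number   -- int(number) on an int is the identity
  (PySem.List.pyRange 1 (n + 1) 5, PySem.List.pyRange 2 (n + 1) 5,
   PySem.List.pyRange 3 (n + 1) 5, PySem.List.pyRange 4 (n + 1) 5,
   PySem.List.pyRange 5 (n + 1) 5, teamname)

-- ===== PRECONDITION & SPEC =====
def Spec_create_player (number : Int) (teamname : String) (out : List Int × List Int × List Int × List Int × List Int × String) : Prop := out = create_player_alt number teamname
instance (number : Int) (teamname : String) (out : List Int × List Int × List Int × List Int × List Int × String) : Decidable (Spec_create_player number teamname out) := by unfold Spec_create_player; infer_instance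

-- ===== CLAIM (what is proved, stated in full; the proofs are below) =====
def Claim_equal_create_player : Prop := ∀ (number : Int) (teamname : String), Dom_create_player number teamname → Spec_create_player number teamname (create_player number teamname)

-- ===== LEMMAS AND PROOFS =====

-- appending one endpoint to a step-5 range
lemma pyRange5_succ (a b : Int) :
    PySem.List.pyRange a (b + 1) 5 =
      if a ≤ b ∧ (5 : Int) ∣ (b - a) then PySem.List.pyRange a b 5 ++ [b]
      else PySem.List.pyRange a b 5 := by
  rw [PySem.List.pyRange_of_pos a (b + 1) (by norm_num),
      PySem.List.pyRange_of_pos a b (by norm_num)]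
  by_cases hc : a ≤ b ∧ (5 : Int) ∣ (b - a)
  · rw [if_pos hc]
    obtain ⟨hab, q, hq⟩ := hc
    have hq0 : 0 ≤ q := by omega
    rw [if_pos (show a < b + 1 by omega)]
    have hc1 : ((b + 1 - a + 5 - 1) / 5).toNat = q.toNat + 1 := by omega
    rw [hc1, List.range_succ, List.map_append]
    by_cases hab' : a < b
    · rw [if_pos hab']
      have hc0 : ((b - a + 5 - 1) / 5).toNat = q.toNat := by omega
      rw [hc0]
      simp only [List.map]
      congr 2
      omega
    · rw [if_neg hab']
      have hqz : q.toNat = 0 := by omega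
      rw [hqz]
      simp only [List.range_zero, List.map_nil, List.nil_append, List.map]
      congr 2
      omega
  · rw [if_neg hc]
    by_cases h1 : a < b
    · rw [if_pos (show a < b + 1 by omega), if_pos h1]
      have hnd : ¬ (5 : Int) ∣ (b - a) := fun hd => hc ⟨by omega, hd⟩
      congr 2
      omega
    · by_cases h2 : a < b + 1
      · exact absurd ⟨by omega, ⟨0, by omega⟩⟩ hc
      · rw [if_neg h2, if_neg h1]

-- the loop over range(m) fills the buckets with the five progressions
lemma loopA_eq (m : Nat) :
    (PySem.List.pyRange 0 (m : Int) 1).foldl pvStepA ([], [], [], [], []) =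
      (PySem.List.pyRange 1 ((m : Int) + 1) 5, PySem.List.pyRange 2 ((m : Int) + 1) 5,
       PySem.List.pyRange 3 ((m : Int) + 1) 5, PySem.List.pyRange 4 ((m : Int) + 1) 5,
       PySem.List.pyRange 5 ((m : Int) + 1) 5) := by
  induction m with
  | zero => decide
  | succ k ih =>
    have hcast : ((k + 1 : Nat) : Int) = (k : Int) + 1 := by push_cast; ring
    rw [hcast, PySem.List.pyRange_one_succ_right (by positivity), List.foldl_append, ih]
    simp only [List.foldl]
    have hm : PySem.Int.mod ((k : Int) + 1) 5 = ((k : Int) + 1) % 5 :=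
      PySem.Int.mod_eq_emod_of_pos (by norm_num)
    have hr : ((k : Int) + 1) % 5 = 0 ∨ ((k : Int) + 1) % 5 = 1 ∨ ((k : Int) + 1) % 5 = 2 ∨
        ((k : Int) + 1) % 5 = 3 ∨ ((k : Int) + 1) % 5 = 4 := by omega
    rcases hr with h | h | h | h | h <;>
      · simp only [pvStepA, hm, h, Int.reduceEq, reduceIte, Prod.mk.injEq]
        refine ⟨?_, ?_, ?_, ?_, ?_⟩ <;>
          (conv_rhs => rw [pyRange5_succ]) <;>
          first
            | rw [if_pos ⟨by omega, by omega⟩]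
            | rw [if_neg (by omega)]

-- empty loops for non-positive n
lemma pyRange_empty_of_le (a b s : Int) (hs : 0 < s) (h : b ≤ a) :
    PySem.List.pyRange a b s = [] := by
  rw [PySem.List.pyRange_of_pos a b hs, if_neg (by omega)]
  simp

-- ===== VERDICT (by name: the statement is the Claim_ definition above) =====
theorem create_player_spec : Claim_equal_create_player := by
  intro number teamname _
  unfold Spec_create_player create_player create_player_alt
  by_cases hn : 0 ≤ number
  · obtain ⟨m, rfl⟩ := Int.eq_ofNat_of_zero_le hn
    rw [loopA_eq m]
  · rw [pyRange_empty_of_le 0 number 1 (by norm_num) (by omega)]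
    simp only [List.foldl]
    rw [pyRange_empty_of_le 1 (number + 1) 5 (by norm_num) (by omega),
        pyRange_empty_of_le 2 (number + 1) 5 (by norm_num) (by omega),
        pyRange_empty_of_le 3 (number + 1) 5 (by norm_num) (by omega),
        pyRange_empty_of_le 4 (number + 1) 5 (by norm_num) (by omega),
        pyRange_empty_of_le 5 (number + 1) 5 (by norm_num) (by omega)]
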